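-- pv_equiv track=rewrite | github.com/HappyPotatoman/Toying-around | AdventOfCode/Day18/main.py | calculate_total_surface_area
-- ===== SOURCE A (Python) =====
-- def calculate_total_surface_area(pixels):
--   # Initialize a counter for the total surface area
--   total_surface_area = 0
--
--   # Initialize a set to store the pixels that have already been processed
--   processed_pixels = set()
--
--   # Iterate over the pixels in the chunk
--   for pixel in pixels:
--     # Skip pixels that have already been processed
--     if pixel in processed_pixels:
--       continue
--
--     # Add the surface area of the current pixel to the total surface area
--     total_surface_area += 6
--
--     # Explore the neighboring pixels
--     for neighbor in get_neighbors(pixel):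
--       # If the neighbor is also in the chunk, subtract its surface area from the total surface area
--       # to account for shared surfaces
--       if neighbor in pixels:
--         total_surface_area -= 1
--
--     # Mark the current pixel as processed
--     processed_pixels.add(pixel)
--
--   return total_surface_area
--
-- def get_neighbors(pixel):
--   # Convert the coordinates to integers
--   x, y, z = pixel
--
--   # Return the coordinates of the neighboring pixels
--   return [(x + 1, y, z), (x - 1, y, z), (x, y + 1, z), (x, y - 1, z), (x, y, z + 1), (x, y, z - 1)]
-- ===== SOURCE B (Python) =====
-- def calculate_total_surface_area(pixels):
--   # Count occurrences of canonical face keys (coordinates doubled, +/-1 on the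
--   # face axis); a face shared by two cubes is seen twice, an exposed face once.
--   counts = {}
--   for (x, y, z) in set(pixels):
--     for face in ((2*x + 1, 2*y, 2*z), (2*x - 1, 2*y, 2*z),
--                  (2*x, 2*y + 1, 2*z), (2*x, 2*y - 1, 2*z),
--                  (2*x, 2*y, 2*z + 1), (2*x, 2*y, 2*z - 1)):
--       counts[face] = counts.get(face, 0) + 1
--   return sum(1 for c in counts.values() if c == 1)
-- ===== Notes on version B (the rewrite author's own statement) =====
-- stated objective: faster
-- what changed: Replaces per-pixel neighbor probes with 'neighbor in pixels' list scans by a single pass that emits 6 canonical face keys per distinct cube into a dict counter and returns the number of face keys occurring exactly once.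
import Mathlib
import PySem

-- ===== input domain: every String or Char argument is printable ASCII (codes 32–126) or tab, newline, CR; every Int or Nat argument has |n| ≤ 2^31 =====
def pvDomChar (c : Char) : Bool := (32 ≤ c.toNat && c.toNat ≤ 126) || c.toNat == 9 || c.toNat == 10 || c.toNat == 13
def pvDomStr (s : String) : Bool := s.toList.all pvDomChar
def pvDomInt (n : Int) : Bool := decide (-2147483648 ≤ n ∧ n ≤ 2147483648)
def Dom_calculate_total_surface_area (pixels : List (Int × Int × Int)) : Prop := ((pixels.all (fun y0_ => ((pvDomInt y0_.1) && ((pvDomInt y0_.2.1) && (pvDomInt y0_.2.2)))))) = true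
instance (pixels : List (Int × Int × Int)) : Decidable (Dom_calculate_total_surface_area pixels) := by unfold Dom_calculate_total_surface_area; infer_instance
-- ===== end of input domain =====

-- B replaces A's per-pixel neighbor list scans with a face-key counter: emit 6 canonical
-- face keys per distinct cube, return how many keys occur exactly once.

-- ===== PORT A =====
def get_neighbors (pixel : Int × Int × Int) : List (Int × Int × Int) :=
  [(pixel.1 + 1, pixel.2.1, pixel.2.2), (pixel.1 - 1, pixel.2.1, pixel.2.2),
   (pixel.1, pixel.2.1 + 1, pixel.2.2), (pixel.1, pixel.2.1 - 1, pixel.2.2),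
   (pixel.1, pixel.2.1, pixel.2.2 + 1), (pixel.1, pixel.2.1, pixel.2.2 - 1)]

def calculate_total_surface_area (pixels : List (Int × Int × Int)) : Int :=
  (pixels.foldl
    (fun (st : Int × PySem.Set (Int × Int × Int)) pixel =>
      if PySem.Set.contains st.2 pixel then st
      else
        ((get_neighbors pixel).foldl
           (fun t n => if pixels.contains n then t - 1 else t) (st.1 + 6),
         PySem.Set.add st.2 pixel))
    ((0 : Int), PySem.Set.empty)).1

-- ===== PORT B =====
def face6 (p : Int × Int × Int) : List (Int × Int × Int) :=
  [(2*p.1 + 1, 2*p.2.1, 2*p.2.2), (2*p.1 - 1, 2*p.2.1, 2*p.2.2),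
   (2*p.1, 2*p.2.1 + 1, 2*p.2.2), (2*p.1, 2*p.2.1 - 1, 2*p.2.2),
   (2*p.1, 2*p.2.1, 2*p.2.2 + 1), (2*p.1, 2*p.2.1, 2*p.2.2 - 1)]

def calculate_total_surface_area_alt (pixels : List (Int × Int × Int)) : Int :=
  let counts :=
    (PySem.Set.ofList pixels).foldl
      (fun d p => (face6 p).foldl (fun d f => d.insert f (d.getD f 0 + 1)) d)
      (PySem.Dict.empty : PySem.Dict (Int × Int × Int) Int)
  (counts.values.map (fun c => if c = (1 : Int) then (1 : Int) else 0)).sum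

-- ===== PRECONDITION & SPEC =====
def Spec_calculate_total_surface_area (pixels : List (Int × Int × Int)) (out : Int) : Prop := out = calculate_total_surface_area_alt pixels
instance (pixels : List (Int × Int × Int)) (out : Int) : Decidable (Spec_calculate_total_surface_area pixels out) := by unfold Spec_calculate_total_surface_area; infer_instance

-- ===== CLAIM (what is proved, stated in full; the proofs are below) =====
def Claim_equal_calculate_total_surface_area : Prop := ∀ (pixels : List (Int × Int × Int)), Dom_calculate_total_surface_area pixels → Spec_calculate_total_surface_area pixels (calculate_total_surface_area pixels)

-- ===== LEMMAS AND PROOFS =====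


-- countP distributes over flatMap as a sum over the outer list
theorem countP_flatMap {α β : Type} (g : α → List β) (P : β → Bool) :
    ∀ L : List α, (L.flatMap g).countP P = (L.map (fun x => (g x).countP P)).sum := by
  intro L; induction L with
  | nil => rfl
  | cons x l ih => simp [List.flatMap_cons, List.countP_append, ih]

theorem count_flatMap (g : (Int×Int×Int) → List (Int×Int×Int)) (f : Int×Int×Int) :
    ∀ L : List (Int×Int×Int), (L.flatMap g).count f = (L.map (fun x => (g x).count f)).sum := by
  intro L; simp [List.count, countP_flatMap]

-- A's inner loop subtracts one per neighbor found in the list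
theorem foldl_sub_one (P : (Int×Int×Int) → Bool) :
    ∀ (l : List (Int×Int×Int)) (c : Int),
      l.foldl (fun t n => if P n then t - 1 else t) c = c - (l.countP P : Int) := by
  intro l; induction l with
  | nil => simp
  | cons x l ih =>
    intro c
    by_cases h : P x <;> simp [List.foldl_cons, h, ih] <;> push_cast <;> ring

-- counting the keys that occur exactly once can be done over the deduped list
theorem dedup_countP_count_one {α : Type} [BEq α] [LawfulBEq α] (L : List α) :
    (PySem.List.dedup L).countP (fun k => L.count k == 1)
      = L.countP (fun k => L.count k == 1) := by
  have hf1 : (L.filter (fun k => L.count k == 1)).Nodup := by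
    rw [List.nodup_iff_count_le_one]
    intro a
    by_cases ha : a ∈ L.filter (fun k => L.count k == 1)
    · have h1 : L.count a = 1 := by
        have := List.of_mem_filter ha; simpa using this
      calc (L.filter (fun k => L.count k == 1)).count a ≤ L.count a :=
              List.Sublist.count_le a (List.filter_sublist)
        _ ≤ 1 := by omega
    · simp [List.count_eq_zero_of_not_mem ha]
  have hf2 : ((PySem.List.dedup L).filter (fun k => L.count k == 1)).Nodup :=
    (PySem.List.nodup_dedup L).filter _
  have hmem : ∀ x, x ∈ (PySem.List.dedup L).filter (fun k => L.count k == 1) ↔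
      x ∈ L.filter (fun k => L.count k == 1) := by
    intro x; simp [List.mem_filter]
  have := (List.perm_ext_iff_of_nodup hf2 hf1).mpr hmem
  simpa [List.countP_eq_length_filter] using this.length_eq

-- the elements A's loop newly adds to the processed set, in order
def newElems (s : List (Int×Int×Int)) : List (Int×Int×Int) → List (Int×Int×Int)
  | [] => []
  | x :: l => if x ∈ s then newElems s l else x :: newElems (s ++ [x]) l

theorem update_eq_append_newElems :
    ∀ (l s : List (Int×Int×Int)), PySem.Set.update s l = s ++ newElems s l := by
  intro l; induction l with
  | nil => intro s; simp [PySem.Set.update, newElems]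
  | cons x l ih =>
    intro s
    by_cases h : x ∈ s
    · have hadd : PySem.Set.add s x = s := by simp [PySem.Set.add, PySem.Set.contains, h]
      simp only [PySem.Set.update, List.foldl_cons, hadd, newElems, if_pos h]
      simpa [PySem.Set.update] using ih s
    · have hadd : PySem.Set.add s x = s ++ [x] := by simp [PySem.Set.add, PySem.Set.contains, h]
      simp only [PySem.Set.update, List.foldl_cons, hadd, newElems, if_neg h]
      have := ih (s ++ [x])
      simp only [PySem.Set.update] at this
      simp [this]

-- invariant of A's outer fold: total = sum of per-new-pixel contributions
theorem A_inv (pixels : List (Int×Int×Int)) :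
    ∀ (l : List (Int×Int×Int)) (t : Int) (s : PySem.Set (Int×Int×Int)),
      l.foldl
        (fun (st : Int × PySem.Set (Int × Int × Int)) pixel =>
          if PySem.Set.contains st.2 pixel then st
          else
            ((get_neighbors pixel).foldl
               (fun t n => if pixels.contains n then t - 1 else t) (st.1 + 6),
             PySem.Set.add st.2 pixel)) (t, s)
        = (t + ((newElems s l).map
            (fun p => 6 - ((get_neighbors p).countP pixels.contains : Int))).sum,
           PySem.Set.update s l) := by
  intro l; induction l with
  | nil => intro t s; simp [newElems, PySem.Set.update]
  | cons x l ih =>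
    intro t s
    by_cases h : x ∈ s
    · have hc : PySem.Set.contains s x = true := by
        simp [PySem.Set.contains, h]
      have hadd : PySem.Set.add s x = s := by simp [PySem.Set.add, PySem.Set.contains, h]
      rw [List.foldl_cons]
      simp only [hc, if_pos]
      rw [ih]
      simp only [newElems, if_pos h, PySem.Set.update, List.foldl_cons, hadd]
    · have hc : PySem.Set.contains s x = false := by
        simp [PySem.Set.contains, h]
      have hadd : PySem.Set.add s x = s ++ [x] := by simp [PySem.Set.add, PySem.Set.contains, h]
      rw [List.foldl_cons]
      simp only [hc, Bool.false_eq_true, if_neg, not_false_iff]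
      rw [foldl_sub_one, ih]
      simp only [newElems, if_neg h, List.map_cons, List.sum_cons, PySem.Set.update,
        List.foldl_cons, hadd]
      have harith : (t + 6 - ((get_neighbors x).countP pixels.contains : Int))
          + ((newElems (s ++ [x]) l).map
              (fun p => 6 - ((get_neighbors p).countP pixels.contains : Int))).sum
          = t + ((6 - ((get_neighbors x).countP pixels.contains : Int))
              + ((newElems (s ++ [x]) l).map
                  (fun p => 6 - ((get_neighbors p).countP pixels.contains : Int))).sum) := by ring
      rw [harith]

-- the six canonical face keys: which cubes' face lists contain each of p's faces
theorem face_key0 (p q : Int×Int×Int) :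
    (face6 q).count (2*p.1 + 1, 2*p.2.1, 2*p.2.2)
      = (if q = p then 1 else 0) + (if q = (p.1 + 1, p.2.1, p.2.2) then 1 else 0) := by
  obtain ⟨a,b,c⟩ := q; obtain ⟨x,y,z⟩ := p
  simp only [face6, List.count_cons, List.count_nil, Prod.mk.injEq, beq_iff_eq]
  split_ifs <;> omega

theorem face_key1 (p q : Int×Int×Int) :
    (face6 q).count (2*p.1 - 1, 2*p.2.1, 2*p.2.2)
      = (if q = p then 1 else 0) + (if q = (p.1 - 1, p.2.1, p.2.2) then 1 else 0) := by
  obtain ⟨a,b,c⟩ := q; obtain ⟨x,y,z⟩ := p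
  simp only [face6, List.count_cons, List.count_nil, Prod.mk.injEq, beq_iff_eq]
  split_ifs <;> omega

theorem face_key2 (p q : Int×Int×Int) :
    (face6 q).count (2*p.1, 2*p.2.1 + 1, 2*p.2.2)
      = (if q = p then 1 else 0) + (if q = (p.1, p.2.1 + 1, p.2.2) then 1 else 0) := by
  obtain ⟨a,b,c⟩ := q; obtain ⟨x,y,z⟩ := p
  simp only [face6, List.count_cons, List.count_nil, Prod.mk.injEq, beq_iff_eq]
  split_ifs <;> omega

theorem face_key3 (p q : Int×Int×Int) :
    (face6 q).count (2*p.1, 2*p.2.1 - 1, 2*p.2.2)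
      = (if q = p then 1 else 0) + (if q = (p.1, p.2.1 - 1, p.2.2) then 1 else 0) := by
  obtain ⟨a,b,c⟩ := q; obtain ⟨x,y,z⟩ := p
  simp only [face6, List.count_cons, List.count_nil, Prod.mk.injEq, beq_iff_eq]
  split_ifs <;> omega

theorem face_key4 (p q : Int×Int×Int) :
    (face6 q).count (2*p.1, 2*p.2.1, 2*p.2.2 + 1)
      = (if q = p then 1 else 0) + (if q = (p.1, p.2.1, p.2.2 + 1) then 1 else 0) := by
  obtain ⟨a,b,c⟩ := q; obtain ⟨x,y,z⟩ := p
  simp only [face6, List.count_cons, List.count_nil, Prod.mk.injEq, beq_iff_eq]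
  split_ifs <;> omega

theorem face_key5 (p q : Int×Int×Int) :
    (face6 q).count (2*p.1, 2*p.2.1, 2*p.2.2 - 1)
      = (if q = p then 1 else 0) + (if q = (p.1, p.2.1, p.2.2 - 1) then 1 else 0) := by
  obtain ⟨a,b,c⟩ := q; obtain ⟨x,y,z⟩ := p
  simp only [face6, List.count_cons, List.count_nil, Prod.mk.injEq, beq_iff_eq]
  split_ifs <;> omega

theorem sum_map_indicator (p : Int×Int×Int) :
    ∀ c : List (Int×Int×Int),
      (c.map (fun q => if q = p then (1:ℕ) else 0)).sum = c.count p := by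
  intro c; induction c with
  | nil => rfl
  | cons x l ih => by_cases h : x = p <;> simp [List.count_cons, h, ih] <;> omega

-- a face occurs once for its cube plus once more iff the cube across it is present
theorem flat_count (c : List (Int×Int×Int)) (hnd : c.Nodup) (p nbr : Int×Int×Int)
    (hp : p ∈ c) (f : Int×Int×Int)
    (hkey : ∀ q, (face6 q).count f
      = (if q = p then 1 else 0) + (if q = nbr then 1 else 0)) :
    (c.flatMap face6).count f = 1 + (if nbr ∈ c then 1 else 0) := by
  rw [count_flatMap]
  have : c.map (fun x => (face6 x).count f)
      = c.map (fun q => (if q = p then 1 else 0) + (if q = nbr then 1 else 0)) :=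
    List.map_congr_left (fun q _ => hkey q)
  rw [this, List.sum_map_add, sum_map_indicator, sum_map_indicator,
      List.count_eq_one_of_mem hnd hp]
  by_cases h : nbr ∈ c
  · simp [h, List.count_eq_one_of_mem hnd h]
  · simp [h, List.count_eq_zero_of_not_mem h]

-- per distinct cube: singleton faces = 6 minus present neighbors
theorem cube_contrib (c : List (Int×Int×Int)) (hnd : c.Nodup) (p : Int×Int×Int) (hp : p ∈ c) :
    (((face6 p).countP (fun f => (c.flatMap face6).count f == 1)) : Int)
      = 6 - ((get_neighbors p).countP (fun n => decide (n ∈ c)) : Int) := by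
  have h0 := flat_count c hnd p _ hp _ (face_key0 p)
  have h1 := flat_count c hnd p _ hp _ (face_key1 p)
  have h2 := flat_count c hnd p _ hp _ (face_key2 p)
  have h3 := flat_count c hnd p _ hp _ (face_key3 p)
  have h4 := flat_count c hnd p _ hp _ (face_key4 p)
  have h5 := flat_count c hnd p _ hp _ (face_key5 p)
  simp only [face6, List.countP_cons, List.countP_nil, h0, h1, h2, h3, h4, h5, get_neighbors]
  by_cases m0 : (p.1 + 1, p.2.1, p.2.2) ∈ c <;>
  by_cases m1 : (p.1 - 1, p.2.1, p.2.2) ∈ c <;>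
  by_cases m2 : (p.1, p.2.1 + 1, p.2.2) ∈ c <;>
  by_cases m3 : (p.1, p.2.1 - 1, p.2.2) ∈ c <;>
  by_cases m4 : (p.1, p.2.1, p.2.2 + 1) ∈ c <;>
  by_cases m5 : (p.1, p.2.1, p.2.2 - 1) ∈ c <;>
    simp [m0, m1, m2, m3, m4, m5]

-- B computes the number of singleton face keys
theorem B_eq (pixels : List (Int×Int×Int)) :
    calculate_total_surface_area_alt pixels
      = ((((PySem.Set.ofList pixels).flatMap face6).countP
           (fun f => ((PySem.Set.ofList pixels).flatMap face6).count f == 1)) : Int) := by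
  unfold calculate_total_surface_area_alt
  rw [← List.foldl_flatMap, PySem.Dict.foldl_insert_getD_add_one_eq_counter]
  set faces := (PySem.Set.ofList pixels).flatMap face6 with hf
  have hv : (PySem.Dict.counter faces).values
      = (PySem.Set.ofList faces).map (fun k => (faces.count k : Int)) := by
    have := PySem.Dict.items_counter (xs := faces)
    simp only [PySem.Dict.values, this, List.map_map]
    rfl
  simp only []
  rw [hv, List.map_map]
  have : ((fun c => if c = (1:Int) then (1:Int) else 0) ∘ fun k => (faces.count k : Int))
      = fun k => if faces.count k == 1 then (1:Int) else 0 := by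
    funext k
    simp [Function.comp]
  rw [this, PySem.List.sum_map_ite_one_zero]
  norm_cast
  rw [← PySem.List.dedup_eq_ofList]
  exact dedup_countP_count_one faces

-- ===== VERDICT (by name: the statement is the Claim_ definition above) =====
theorem calculate_total_surface_area_spec : Claim_equal_calculate_total_surface_area := by
  intro pixels _
  unfold Spec_calculate_total_surface_area calculate_total_surface_area
  rw [show (PySem.Set.empty : PySem.Set (Int × Int × Int)) = [] from rfl, A_inv pixels pixels 0 []]
  have hnew : newElems [] pixels = PySem.Set.ofList pixels := by
    have := update_eq_append_newElems pixels []
    simpa [PySem.Set.update, PySem.Set.ofList_eq_foldl] using this.symm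
  set c := PySem.Set.ofList pixels with hc
  rw [B_eq, countP_flatMap]
  have hnd : c.Nodup := PySem.Set.nodup_ofList pixels
  have hcast : (((c.map (fun p => (face6 p).countP
        (fun f => (c.flatMap face6).count f == 1))).sum : ℕ) : Int)
      = (c.map (fun p => (((face6 p).countP
        (fun f => (c.flatMap face6).count f == 1)) : Int))).sum := by
    push_cast
    rw [List.map_map]
    rfl
  rw [hcast]
  have hmapeq : c.map (fun p => (((face6 p).countP
        (fun f => (c.flatMap face6).count f == 1)) : Int))
      = c.map (fun p => 6 - ((get_neighbors p).countP pixels.contains : Int)) := by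
    refine List.map_congr_left (fun p hp => ?_)
    rw [cube_contrib c hnd p hp]
    have : (get_neighbors p).countP (fun n => decide (n ∈ c))
        = (get_neighbors p).countP pixels.contains := by
      refine List.countP_congr (fun n _ => ?_)
      by_cases h : n ∈ pixels <;> simp [hc, h, PySem.Set.mem_ofList]
    rw [this]
  rw [hmapeq, hnew]
  simp
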